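-- pv_equiv track=rewrite | github.com/andreathar/ml | .openspec/unity-kb/generate_auto_memories.py | _build_namespace_tree
-- ===== SOURCE A (Python) =====
-- from typing import Dict, List, Optional
--
-- def _build_namespace_tree(symbols: List[Dict]) -> Dict:
--     """Build namespace hierarchy from symbols"""
--     tree = {}
--     for symbol in symbols:
--         namespace = symbol.get('namespace', 'Global')
--         if namespace not in tree:
--             tree[namespace] = []
--         if symbol['kind'] == 'class':
--             tree[namespace].append(symbol['name'])
--     return tree
-- ===== SOURCE B (Python) =====
-- def _build_namespace_tree(symbols):
--     """Nested scan: collect the distinct namespaces first, then for each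
--     namespace filter the whole symbol list for its class names."""
--     order = list(dict.fromkeys(s.get('namespace', 'Global') for s in symbols))
--     return {ns: [s['name'] for s in symbols
--                  if s['kind'] == 'class' and s.get('namespace', 'Global') == ns]
--             for ns in order}
-- ===== Notes on version B (the rewrite author's own statement) =====
-- stated objective: alternative
-- what changed: B replaces A's single grouping pass (ensure-key-then-append per symbol into one dict) by a nested scan: it first collects the distinct namespaces in first-appearance order, then for each namespace re-scans the whole symbol list to filter out its class names.
import Mathlib
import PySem

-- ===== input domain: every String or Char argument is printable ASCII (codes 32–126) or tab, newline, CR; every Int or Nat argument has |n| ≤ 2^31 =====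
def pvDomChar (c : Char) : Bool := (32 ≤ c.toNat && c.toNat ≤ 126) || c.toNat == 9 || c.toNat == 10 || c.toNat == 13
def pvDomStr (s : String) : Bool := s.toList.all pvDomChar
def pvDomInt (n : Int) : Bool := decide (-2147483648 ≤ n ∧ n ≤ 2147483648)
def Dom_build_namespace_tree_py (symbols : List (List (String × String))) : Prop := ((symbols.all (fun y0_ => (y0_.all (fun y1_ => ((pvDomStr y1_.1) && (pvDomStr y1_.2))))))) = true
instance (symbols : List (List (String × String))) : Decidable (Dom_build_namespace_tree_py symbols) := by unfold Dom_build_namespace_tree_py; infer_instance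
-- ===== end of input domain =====

-- B replaces A's single grouping pass by a nested scan (distinct namespaces first,
-- then a filter of the whole list per namespace); same output — objective: alternative, no speed claim.

-- symbol.get(k, d): a symbol is an association list, read through PySem.Dict (first match).
def pvSymGet (symbol : List (String × String)) (k d : String) : String :=
  (PySem.Dict.mk symbol).getD k d

def pvNs (symbol : List (String × String)) : String := pvSymGet symbol "namespace" "Global"
def pvIsCls (symbol : List (String × String)) : Bool := pvSymGet symbol "kind" "" == "class"
def pvName (symbol : List (String × String)) : String := pvSymGet symbol "name" ""

-- ===== PORT A =====
-- one interleaved pass: ensure the namespace key exists, then maybe append the class name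
def pvAStep (tree : PySem.Dict String (List String)) (symbol : List (String × String)) :
    PySem.Dict String (List String) :=
  let ns := pvNs symbol
  let tree := if tree.contains ns then tree else tree.insert ns []
  if pvIsCls symbol then tree.modify ns [] (fun l => l ++ [pvName symbol]) else tree

def build_namespace_tree_py (symbols : List (List (String × String))) : List (String × List String) :=
  (symbols.foldl pvAStep (PySem.Dict.mk [])).items

-- ===== PORT B =====
-- the inner comprehension: class names of the given namespace, in symbol order
def pvClassNames (symbols : List (List (String × String))) (ns : String) : List String :=
  (symbols.filter (fun s => pvIsCls s && (pvNs s == ns))).map pvName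

-- dict.fromkeys = PySem.List.dedup; the outer dict comprehension ranges over DISTINCT keys,
-- so the resulting dict is exactly this association list in key order (exact).
def build_namespace_tree_py_alt (symbols : List (List (String × String))) : List (String × List String) :=
  (PySem.List.dedup (symbols.map pvNs)).map (fun ns => (ns, pvClassNames symbols ns))

-- ===== PRECONDITION & SPEC =====
-- Pre_ excludes exactly the inputs where Python A raises KeyError: a symbol without a 'kind'
-- key, or a 'class' symbol without a 'name' key.
def Pre_build_namespace_tree_py (symbols : List (List (String × String))) : Prop :=
  (symbols.all (fun s =>
    ((PySem.Dict.mk s).get? "kind").isSome &&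
    (!((PySem.Dict.mk s).getD "kind" "" == "class") || ((PySem.Dict.mk s).get? "name").isSome))) = true
instance (symbols : List (List (String × String))) : Decidable (Pre_build_namespace_tree_py symbols) := by
  unfold Pre_build_namespace_tree_py; infer_instance

def pvWitness_build_namespace_tree_py : (List (List (String × String))) :=
  [[("kind", "class"), ("name", "Foo")], [("namespace", "N"), ("kind", "enum")]]

def Spec_build_namespace_tree_py (symbols : List (List (String × String))) (out : List (String × List String)) : Prop := out = build_namespace_tree_py_alt symbols
instance (symbols : List (List (String × String))) (out : List (String × List String)) : Decidable (Spec_build_namespace_tree_py symbols out) := by unfold Spec_build_namespace_tree_py; infer_instance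

-- ===== CLAIM (what is proved, stated in full; the proofs are below) =====
def Claim_equal_build_namespace_tree_py : Prop := ∀ (symbols : List (List (String × String))), Dom_build_namespace_tree_py symbols → Pre_build_namespace_tree_py symbols → Spec_build_namespace_tree_py symbols (build_namespace_tree_py symbols)

-- ===== LEMMAS AND PROOFS =====

-- one A step adds the symbol's namespace to the key list (set-add: no-op if present)
theorem keys_pvAStep (t : PySem.Dict String (List String)) (s : List (String × String)) :
    (pvAStep t s).keys = PySem.Set.add t.keys (pvNs s) := by
  unfold pvAStep PySem.Set.add
  by_cases hc : t.contains (pvNs s) = true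
  · have hm : pvNs s ∈ t.keys := (PySem.Dict.contains_iff_mem_keys t _).mp hc
    by_cases hk : pvIsCls s = true
    · simp [hc, hk, PySem.Dict.keys_modify, PySem.Dict.keys_insert_of_contains _ _ hc, hm]
    · simp [hc, hk, hm]
  · have hc' : t.contains (pvNs s) = false := by simpa using hc
    have hm : ¬ pvNs s ∈ t.keys := fun h => by
      rw [(PySem.Dict.contains_iff_mem_keys t _).mpr h] at hc'; exact absurd hc' (by simp)
    by_cases hk : pvIsCls s = true
    · simp [hc', hk, PySem.Dict.keys_modify, hm,
        PySem.Dict.keys_insert_of_contains _ _ (PySem.Dict.contains_insert_self t _ []),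
        PySem.Dict.keys_insert_of_not_contains _ _ hc']
    · simp [hc', hk, hm, PySem.Dict.keys_insert_of_not_contains _ _ hc']

-- the A fold's key list is the set-update by all the namespaces
theorem keys_fold (ss : List (List (String × String))) (t : PySem.Dict String (List String)) :
    (ss.foldl pvAStep t).keys = PySem.Set.update t.keys (ss.map pvNs) := by
  induction ss generalizing t with
  | nil => simp [PySem.Set.update_nil]
  | cons s ss ih =>
    simp only [List.foldl_cons, List.map_cons, PySem.Set.update_cons, ih, keys_pvAStep]

-- the "ensure key" half of A's step never changes a getD with default []
theorem getD_ensure (t : PySem.Dict String (List String)) (ns k : String) :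
    (if t.contains ns then t else t.insert ns []).getD k [] = t.getD k [] := by
  by_cases hc : t.contains ns = true
  · simp [hc]
  · have hc' : t.contains ns = false := by simpa using hc
    rw [if_neg (by simp [hc']), PySem.Dict.getD_insert]
    by_cases hk : k = ns
    · subst hk; simp [PySem.Dict.getD_of_not_contains t [] hc']
    · simp [hk]

-- one A step changes getD at exactly the class symbol's own namespace, by appending its name
theorem getD_pvAStep (t : PySem.Dict String (List String)) (s : List (String × String)) (k : String) :
    (pvAStep t s).getD k [] =
      if pvIsCls s && (pvNs s == k) then t.getD k [] ++ [pvName s] else t.getD k [] := by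
  unfold pvAStep
  by_cases hcls : pvIsCls s = true
  · simp only [hcls, if_true, Bool.true_and]
    rw [PySem.Dict.getD_modify, getD_ensure, getD_ensure]
    by_cases hk : k = pvNs s
    · subst hk
      simp only [beq_self_eq_true, if_true]
    · have hb : (pvNs s == k) = false := beq_eq_false_iff_ne.mpr (fun h => hk h.symm)
      simp [hk, hb]
  · have h : pvIsCls s = false := by simpa using hcls
    simp only [h, Bool.false_eq_true, if_false, Bool.false_and]
    exact getD_ensure t (pvNs s) k

-- the A fold's value at k is the filtered class names appended to the start value
theorem getD_fold (ss : List (List (String × String))) (t : PySem.Dict String (List String)) (k : String) :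
    (ss.foldl pvAStep t).getD k [] =
      t.getD k [] ++ (ss.filter (fun s => pvIsCls s && (pvNs s == k))).map pvName := by
  induction ss generalizing t with
  | nil => simp
  | cons s ss ih =>
    simp only [List.foldl_cons, ih, getD_pvAStep, List.filter_cons]
    by_cases h : (pvIsCls s && (pvNs s == k)) = true <;> simp [h]

-- the A fold's keys are unique
theorem nodup_keys_fold (ss : List (List (String × String))) :
    (ss.foldl pvAStep (PySem.Dict.mk [])).keys.Nodup := by
  rw [keys_fold]
  exact PySem.Set.nodup_update _ _ (by simp [PySem.Dict.keys_mk])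

-- ===== VERDICT (by name: the statement is the Claim_ definition above) =====
theorem build_namespace_tree_py_spec : Claim_equal_build_namespace_tree_py := by
  intro symbols _ _
  unfold Spec_build_namespace_tree_py build_namespace_tree_py build_namespace_tree_py_alt
  rw [PySem.Dict.items_eq_map_keys _ (nodup_keys_fold symbols) [], keys_fold]
  simp only [PySem.Dict.keys_mk, List.map_nil, PySem.Set.update_nil_left,
    PySem.List.dedup_eq_ofList]
  apply List.map_congr_left
  intro ns _
  rw [getD_fold]
  have h0 : (PySem.Dict.mk ([] : List (String × List String))).getD ns [] = [] := rfl
  simp [pvClassNames, h0]
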